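-- pv_equiv track=rewrite | github.com/TomKite57/advent_of_code_2020 | python/headers/day10.py | split_chain
-- ===== SOURCE A (Python) =====
-- def split_chain(data, chain, tolerance=3):
--     segments = []
--     seg_start = 0
--     for i in range(1, len(chain)):
--         if data[chain[i]] - data[chain[i-1]] == tolerance:
--             segments.append(chain[seg_start:i])
--             seg_start = i
--     segments.append(chain[seg_start:])
--     return segments
-- ===== SOURCE B (Python) =====
-- def split_chain(data, chain, tolerance=3):
--     segments = []
--     current = []
--     prev = None
--     for c in chain:
--         if prev is not None and data[c] - data[prev] == tolerance:
--             segments.append(current)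
--             current = [c]
--         else:
--             current.append(c)
--         prev = c
--     segments.append(current)
--     return segments
-- ===== Notes on version B (the rewrite author's own statement) =====
-- stated objective: simpler
-- what changed: A loops over indices and cuts segments out of the chain with slices tracked by seg_start; B makes one pass over the chain values themselves, growing the current segment element by element and flushing it at each tolerance-sized gap, with no index arithmetic or slicing.
import Mathlib
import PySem

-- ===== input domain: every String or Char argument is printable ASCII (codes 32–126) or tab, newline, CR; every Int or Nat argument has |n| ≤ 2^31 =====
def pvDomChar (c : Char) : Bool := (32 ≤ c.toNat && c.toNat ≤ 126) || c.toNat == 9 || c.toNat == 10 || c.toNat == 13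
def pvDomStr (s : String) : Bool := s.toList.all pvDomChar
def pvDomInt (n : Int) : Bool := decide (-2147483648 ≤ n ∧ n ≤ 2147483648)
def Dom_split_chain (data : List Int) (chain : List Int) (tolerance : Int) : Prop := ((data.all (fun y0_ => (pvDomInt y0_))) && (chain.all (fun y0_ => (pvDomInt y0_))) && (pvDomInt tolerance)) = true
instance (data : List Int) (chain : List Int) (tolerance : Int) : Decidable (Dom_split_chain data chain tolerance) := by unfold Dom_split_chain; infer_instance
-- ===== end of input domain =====

-- B replaces A's index loop with slicing by a single pass over the chain values that
-- grows the current segment directly (objective: simpler, same O(n) cost).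
-- Python's data[c] (may be negative): ported as pyGetD with default 0; the default is
-- reachable only outside Pre_split_chain, where Python raises IndexError.

-- ===== PORT A =====
-- loop body of A's 'for i in range(1, len(chain))', state = (segments, seg_start)
def pvStepA (data : List Int) (chain : List Int) (tolerance : Int)
    (st : List (List Int) × Int) (i : Int) : List (List Int) × Int :=
  if PySem.List.pyGetD data (PySem.List.pyGetD chain i 0) 0
      - PySem.List.pyGetD data (PySem.List.pyGetD chain (i - 1) 0) 0 = tolerance
  then (st.1 ++ [PySem.List.slice chain (some st.2) (some i)], i)
  else st

def split_chain (data : List Int) (chain : List Int) (tolerance : Int) : List (List Int) :=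
  let st := (PySem.List.pyRange 1 (chain.length : Int) 1).foldl (pvStepA data chain tolerance) ([], 0)
  st.1 ++ [PySem.List.slice chain (some st.2) none]

-- ===== PORT B =====
-- loop body of B's 'for c in chain', state = (segments, current, prev)
def pvStepB (data : List Int) (tolerance : Int)
    (st : List (List Int) × List Int × Option Int) (c : Int) : List (List Int) × List Int × Option Int :=
  match st.2.2 with
  | some p =>
      if PySem.List.pyGetD data c 0 - PySem.List.pyGetD data p 0 = tolerance
      then (st.1 ++ [st.2.1], [c], some c)
      else (st.1, st.2.1 ++ [c], some c)
  | none => (st.1, st.2.1 ++ [c], some c)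

def split_chain_alt (data : List Int) (chain : List Int) (tolerance : Int) : List (List Int) :=
  let st := chain.foldl (pvStepB data tolerance) ([], [], none)
  st.1 ++ [st.2.1]

-- ===== PRECONDITION & SPEC =====
-- A indexes data[chain[i]] for every chain element as soon as len(chain) ≥ 2; out-of-range
-- indices raise IndexError in Python, so exactly those inputs are excluded.
def Pre_split_chain (data : List Int) (chain : List Int) (tolerance : Int) : Prop :=
  2 ≤ chain.length → ∀ c ∈ chain, -(data.length : Int) ≤ c ∧ c < (data.length : Int)
instance (data : List Int) (chain : List Int) (tolerance : Int) : Decidable (Pre_split_chain data chain tolerance) := by unfold Pre_split_chain; infer_instance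

def pvWitness_split_chain : List Int × List Int × Int := ([1, 2, 5, 6], [0, 1, 2, 3], 3)

def Spec_split_chain (data : List Int) (chain : List Int) (tolerance : Int) (out : List (List Int)) : Prop := out = split_chain_alt data chain tolerance
instance (data : List Int) (chain : List Int) (tolerance : Int) (out : List (List Int)) : Decidable (Spec_split_chain data chain tolerance out) := by unfold Spec_split_chain; infer_instance

-- ===== CLAIM (what is proved, stated in full; the proofs are below) =====
def Claim_equal_split_chain : Prop := ∀ (data : List Int) (chain : List Int) (tolerance : Int), Dom_split_chain data chain tolerance → Pre_split_chain data chain tolerance → Spec_split_chain data chain tolerance (split_chain data chain tolerance)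

-- ===== LEMMAS AND PROOFS =====

-- appending element k of chain extends a take-slice starting at m ≤ k by one
lemma pv_drop_take_succ (chain : List Int) (m k : Nat) (hmk : m ≤ k) (hk : k < chain.length) :
    (chain.drop m).take (k - m) ++ [chain.getD k 0] = (chain.drop m).take (k + 1 - m) := by
  rw [show k + 1 - m = (k - m) + 1 by omega, List.take_add_one]
  have h1 : (chain.drop m)[k - m]? = chain[k]? := by
    rw [List.getElem?_drop]; congr 1; omega
  rw [h1, List.getElem?_eq_getElem hk]
  simp [List.getD, List.getElem?_eq_getElem hk]

-- Invariant tying A's state after indices 1..k-1 to B's state after the first k elements.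
lemma pv_invariant (data chain : List Int) (tolerance : Int) (k : Nat)
    (hk1 : 1 ≤ k) (hkn : k ≤ chain.length) :
    ∃ (S : List (List Int)) (m : Nat), m < k ∧
      (PySem.List.pyRange 1 (k : Int) 1).foldl (pvStepA data chain tolerance) ([], 0) = (S, (m : Int)) ∧
      (chain.take k).foldl (pvStepB data tolerance) ([], [], none)
        = (S, (chain.drop m).take (k - m), some (chain.getD (k - 1) 0)) := by
  induction k with
  | zero => omega
  | succ k ih =>
    rcases Nat.eq_or_lt_of_le hk1 with h1 | h1
    · -- k + 1 = 1 : base case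
      have hk0 : k = 0 := by omega
      subst hk0
      refine ⟨[], 0, by omega, ?_, ?_⟩
      · rw [show ((1 : Nat) : Int) = 1 by norm_num, PySem.List.pyRange_one_eq_nil (by norm_num)]
        simp
      · rcases chain with _ | ⟨c, rest⟩
        · simp at hkn
        · simp [pvStepB, List.getD]
    · -- k ≥ 1
      have hk : 1 ≤ k := by omega
      have hklt : k < chain.length := by omega
      obtain ⟨S, m, hm, hA, hB⟩ := ih hk (by omega)
      have hgetk : PySem.List.pyGetD chain (k : Int) 0 = chain.getD k 0 :=
        PySem.List.pyGetD_natCast chain k 0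
      have hgetk1 : PySem.List.pyGetD chain ((k : Int) - 1) 0 = chain.getD (k - 1) 0 := by
        rw [show ((k : Int) - 1) = ((k - 1 : Nat) : Int) by omega]
        exact PySem.List.pyGetD_natCast chain (k - 1) 0
      have htake : chain.take (k + 1) = chain.take k ++ [chain.getD k 0] := by
        rw [List.take_add_one, List.getElem?_eq_getElem hklt]
        simp [List.getD, List.getElem?_eq_getElem hklt]
      have hrange : PySem.List.pyRange 1 ((k : Nat) + 1 : Int) 1
          = PySem.List.pyRange 1 (k : Int) 1 ++ [(k : Int)] := by
        exact_mod_cast PySem.List.pyRange_one_succ_right (a := 1) (b := (k : Int)) (by exact_mod_cast hk)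
      by_cases hcond : PySem.List.pyGetD data (chain.getD k 0) 0
          - PySem.List.pyGetD data (chain.getD (k - 1) 0) 0 = tolerance
      · refine ⟨S ++ [(chain.drop m).take (k - m)], k, by omega, ?_, ?_⟩
        · rw [show (((k : Nat) + 1 : Nat) : Int) = ((k : Nat) + 1 : Int) by push_cast; ring, hrange,
            List.foldl_append, hA]
          simp only [List.foldl_cons, List.foldl_nil, pvStepA, hgetk, hgetk1, hcond, if_pos]
          rw [PySem.List.slice_natCast]
        · rw [htake, List.foldl_append, hB]
          simp only [List.foldl_cons, List.foldl_nil, pvStepB, hcond, if_pos]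
          have hcur : [chain.getD k 0] = (chain.drop k).take (k + 1 - k) := by
            have := pv_drop_take_succ chain k k le_rfl hklt
            simpa using this
          rw [show k + 1 - 1 = k by omega]
          rw [← hcur]
      · refine ⟨S, m, by omega, ?_, ?_⟩
        · rw [show (((k : Nat) + 1 : Nat) : Int) = ((k : Nat) + 1 : Int) by push_cast; ring, hrange,
            List.foldl_append, hA]
          simp only [List.foldl_cons, List.foldl_nil, pvStepA, hgetk, hgetk1, hcond, if_neg,
            not_false_iff]
        · rw [htake, List.foldl_append, hB]
          simp only [List.foldl_cons, List.foldl_nil, pvStepB, hcond, if_neg, not_false_iff]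
          rw [pv_drop_take_succ chain m k (by omega) hklt]
          rw [show k + 1 - 1 = k by omega]

-- ===== VERDICT (by name: the statement is the Claim_ definition above) =====
theorem split_chain_spec : Claim_equal_split_chain := by
  intro data chain tolerance _ _
  unfold Spec_split_chain split_chain split_chain_alt
  rcases Nat.eq_zero_or_pos chain.length with h0 | h1
  · have hc : chain = [] := List.length_eq_zero_iff.mp h0
    subst hc
    rfl
  · obtain ⟨S, m, hm, hA, hB⟩ := pv_invariant data chain tolerance chain.length h1 le_rfl
    rw [List.take_length] at hB
    rw [hA, hB]
    simp only
    congr 1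
    rw [PySem.List.slice_from_natCast]
    have : (chain.drop m).take (chain.length - m) = chain.drop m := by
      apply List.take_of_length_le; rw [List.length_drop]
    rw [this]
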